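-- pv_equiv track=rewrite | github.com/michaelsedbon/PhD | experiments/EXP_001/restriction_utils.py | sites_per_window
-- ===== SOURCE A (Python) =====
-- from typing import Dict, List, Tuple
--
-- def sites_per_window(
--     positions: List[int],
--     genome_len: int,
--     window_size: int = 7000,
-- ) -> List[Tuple[int, int]]:
--     """
--     For every 1 kb step across the genome, count how many restriction sites
--     fall within a window of *window_size* bp centred on that position.
--
--     Returns a list of (position, count) tuples.
--     """
--     from bisect import bisect_left, bisect_right
--
--     pos_sorted = sorted(positions)
--     results = []
--     step = 1000
--     for start in range(0, genome_len, step):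
--         end = start + window_size
--         if end <= genome_len:
--             count = bisect_right(pos_sorted, end) - bisect_left(pos_sorted, start)
--         else:
--             # Wrap around circular genome
--             count = (
--                 bisect_right(pos_sorted, genome_len) - bisect_left(pos_sorted, start)
--                 + bisect_right(pos_sorted, end - genome_len)
--             )
--         results.append((start, count))
--     return results
-- ===== SOURCE B (Python) =====
-- def sites_per_window(positions, genome_len, window_size=7000):
--     """Count sites per sliding window by direct scans of `positions` (no sort, no bisect)."""
--     results = []
--     for start in range(0, genome_len, 1000):
--         end = start + window_size
--         if end <= genome_len:
--             count = sum(1 for p in positions if start <= p <= end)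
--         else:
--             count = sum(1 for p in positions if start <= p <= genome_len) \
--                   + sum(1 for p in positions if p <= end - genome_len)
--         results.append((start, count))
--     return results
-- ===== Notes on version B (the rewrite author's own statement) =====
-- stated objective: simpler
-- what changed: Replaced sort + binary search (bisect) with direct per-window scans of the unsorted positions list (inclusive range count, plus two additive counts in the wrap case).
-- intended difference: When window_size is negative and some site lies strictly between a window's end and its start, A returns a negative 'count' (the bisect difference goes negative on an empty window) while B returns 0, the intended number of sites in an empty window. — e.g. on sites_per_window([-3], 5, -5): A returns [(0, -1)], B returns [(0, 0)]
import Mathlib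
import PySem

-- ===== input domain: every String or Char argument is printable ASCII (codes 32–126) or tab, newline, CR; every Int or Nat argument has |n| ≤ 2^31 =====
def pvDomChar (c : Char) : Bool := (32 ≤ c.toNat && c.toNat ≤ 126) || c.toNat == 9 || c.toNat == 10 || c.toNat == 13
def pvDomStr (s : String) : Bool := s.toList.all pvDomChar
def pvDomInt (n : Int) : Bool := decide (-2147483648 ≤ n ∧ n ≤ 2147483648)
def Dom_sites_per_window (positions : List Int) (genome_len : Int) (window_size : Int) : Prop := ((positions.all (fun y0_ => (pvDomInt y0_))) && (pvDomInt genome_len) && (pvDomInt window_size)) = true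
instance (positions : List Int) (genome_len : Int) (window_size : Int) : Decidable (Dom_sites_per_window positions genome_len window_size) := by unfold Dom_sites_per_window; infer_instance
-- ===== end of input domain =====

-- B replaces A's sort + bisect with direct per-window scans of the unsorted list; simpler, not faster.


-- ===== PORT A =====
def sites_per_window (positions : List Int) (genome_len : Int) (window_size : Int) : List (Int × Int) :=
  let pos_sorted := PySem.List.sorted positions (fun x => x) false
  let step : Int := 1000
  (PySem.List.pyRange 0 genome_len step).foldl
    (fun results start =>
      let e := start + window_size
      let count : Int :=
        if e ≤ genome_len then
          (PySem.List.bisectRight pos_sorted e : Int) - (PySem.List.bisectLeft pos_sorted start : Int)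
        else
          (PySem.List.bisectRight pos_sorted genome_len : Int) - (PySem.List.bisectLeft pos_sorted start : Int)
            + (PySem.List.bisectRight pos_sorted (e - genome_len) : Int)
      results ++ [(start, count)]) []

-- ===== PORT B =====
def sites_per_window_alt (positions : List Int) (genome_len : Int) (window_size : Int) : List (Int × Int) :=
  (PySem.List.pyRange 0 genome_len 1000).map
    (fun start =>
      let e := start + window_size
      let count : Int :=
        if e ≤ genome_len then
          (positions.countP (fun p => decide (start ≤ p ∧ p ≤ e)) : Int)
        else
          (positions.countP (fun p => decide (start ≤ p ∧ p ≤ genome_len)) : Int)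
            + (positions.countP (fun p => decide (p ≤ e - genome_len)) : Int)
      (start, count))

-- ===== PRECONDITION & SPEC =====
-- When window_size is negative and some site lies strictly between a window's end and its start,
-- A returns a negative "count" (the bisect difference goes negative on an empty window) while B
-- returns 0, the intended number of sites in an empty window.
def D_sites_per_window (positions : List Int) (genome_len : Int) (window_size : Int) : Prop :=
  window_size < 0 ∧ ∃ s ∈ PySem.List.pyRange 0 genome_len 1000, ∃ p ∈ positions,
    s + window_size < p ∧ p < s
instance (positions : List Int) (genome_len : Int) (window_size : Int) : Decidable (D_sites_per_window positions genome_len window_size) := by unfold D_sites_per_window; infer_instance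

def Spec_sites_per_window (positions : List Int) (genome_len : Int) (window_size : Int) (out : List (Int × Int)) : Prop := ¬ D_sites_per_window positions genome_len window_size → out = sites_per_window_alt positions genome_len window_size
instance (positions : List Int) (genome_len : Int) (window_size : Int) (out : List (Int × Int)) : Decidable (Spec_sites_per_window positions genome_len window_size out) := by unfold Spec_sites_per_window; infer_instance

def pvDiffWitness_sites_per_window : List Int × Int × Int := ([-3], 5, -5)
def pvDiffWitnessOut_sites_per_window : (List (Int × Int)) × (List (Int × Int)) := ([(0, -1)], [(0, 0)])

-- ===== CLAIM (what is proved, stated in full; the proofs are below) =====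
def Claim_unchanged_sites_per_window : Prop := ∀ (positions : List Int) (genome_len : Int) (window_size : Int), Dom_sites_per_window positions genome_len window_size → Spec_sites_per_window positions genome_len window_size (sites_per_window positions genome_len window_size)
def Claim_changed_sites_per_window : Prop := Dom_sites_per_window (pvDiffWitness_sites_per_window.1) (pvDiffWitness_sites_per_window.2.1) (pvDiffWitness_sites_per_window.2.2) ∧ D_sites_per_window (pvDiffWitness_sites_per_window.1) (pvDiffWitness_sites_per_window.2.1) (pvDiffWitness_sites_per_window.2.2) ∧ sites_per_window (pvDiffWitness_sites_per_window.1) (pvDiffWitness_sites_per_window.2.1) (pvDiffWitness_sites_per_window.2.2) = pvDiffWitnessOut_sites_per_window.1 ∧ sites_per_window_alt (pvDiffWitness_sites_per_window.1) (pvDiffWitness_sites_per_window.2.1) (pvDiffWitness_sites_per_window.2.2) = pvDiffWitnessOut_sites_per_window.2 ∧ pvDiffWitnessOut_sites_per_window.1 ≠ pvDiffWitnessOut_sites_per_window.2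
def Claim_exact_sites_per_window : Prop := ∀ (positions : List Int) (genome_len : Int) (window_size : Int), Dom_sites_per_window positions genome_len window_size → D_sites_per_window positions genome_len window_size → sites_per_window positions genome_len window_size ≠ sites_per_window_alt positions genome_len window_size

-- ===== LEMMAS AND PROOFS =====

-- countP of a list whose first k entries satisfy p and whose remaining entries do not is k.
lemma countP_split {α : Type} (ys : List α) (p : α → Bool) (k : Nat) (hk : k ≤ ys.length)
    (h1 : ∀ j (hj : j < ys.length), j < k → p ys[j])
    (h2 : ∀ j (hj : j < ys.length), k ≤ j → p ys[j] = false) :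
    ys.countP p = k := by
  induction ys generalizing k with
  | nil => simp only [List.length_nil, Nat.le_zero] at hk; simp [hk]
  | cons y t ih =>
    cases k with
    | zero =>
      have hy : p y = false := h2 0 (by simp) (by omega)
      have ht : t.countP p = 0 := ih 0 (by omega)
        (by intro j hj hj0; omega)
        (by intro j hj _; exact h2 (j+1) (by simpa using Nat.succ_lt_succ hj) (by omega))
      simp [hy, ht]
    | succ k' =>
      have hy : p y = true := h1 0 (by simp) (by omega)
      have ht : t.countP p = k' := ih k' (by simpa using hk)
        (by intro j hj hjk; exact h1 (j+1) (by simpa using Nat.succ_lt_succ hj) (by omega))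
        (by intro j hj hjk; exact h2 (j+1) (by simpa using Nat.succ_lt_succ hj) (by omega))
      simp [hy, ht]

lemma bisectLeft_eq_countP (ys : List Int) (h : ys.Pairwise (· ≤ ·)) (x : Int) :
    PySem.List.bisectLeft ys x = ys.countP (fun p => decide (p < x)) := by
  obtain ⟨hle, hlt, hge⟩ := PySem.List.bisectLeft_spec ys x h
  exact (countP_split ys _ _ hle
    (fun j hj hjk => by simpa using hlt j hj hjk)
    (fun j hj hjk => by simpa using not_lt.mpr (hge j hj hjk))).symm

lemma bisectRight_eq_countP (ys : List Int) (h : ys.Pairwise (· ≤ ·)) (x : Int) :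
    PySem.List.bisectRight ys x = ys.countP (fun p => decide (p ≤ x)) := by
  obtain ⟨hle, hlt, hge⟩ := PySem.List.bisectRight_spec ys x h
  exact (countP_split ys _ _ hle
    (fun j hj hjk => by simpa using hlt j hj hjk)
    (fun j hj hjk => by simpa using not_le.mpr (hge j hj hjk))).symm

-- the central subtraction identity between A's bisect differences and B's inclusive counts
lemma count_sub (xs : List Int) (s e : Int) :
    (xs.countP (fun p => decide (p ≤ e)) : Int) - (xs.countP (fun p => decide (p < s)) : Int)
      = (xs.countP (fun p => decide (s ≤ p ∧ p ≤ e)) : Int)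
        - (xs.countP (fun p => decide (e < p ∧ p < s)) : Int) := by
  induction xs with
  | nil => simp
  | cons x t ih =>
    simp only [List.countP_cons]
    split_ifs with h1 h2 h3 h4 h5 h6 h7 h8 h9 h10 h11 <;> push_cast <;> simp_all <;> omega

-- A's per-window count via countP over the ORIGINAL list
lemma bisect_counts (positions : List Int) (x : Int) :
    (PySem.List.bisectRight (PySem.List.sorted positions (fun x => x) false) x
       = positions.countP (fun p => decide (p ≤ x)))
    ∧ (PySem.List.bisectLeft (PySem.List.sorted positions (fun x => x) false) x
       = positions.countP (fun p => decide (p < x))) := by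
  have hperm := PySem.List.sorted_perm positions (fun x => x) false
  have hpw : (PySem.List.sorted positions (fun x => x) false).Pairwise (· ≤ ·) :=
    PySem.List.sorted_pairwise positions (fun x => x)
  constructor
  · rw [bisectRight_eq_countP _ hpw, hperm.countP_eq]
  · rw [bisectLeft_eq_countP _ hpw, hperm.countP_eq]

-- A as a map over the range (unfolds the foldl-append loop)
lemma sites_per_window_eq_map (positions : List Int) (genome_len window_size : Int) :
    sites_per_window positions genome_len window_size
      = (PySem.List.pyRange 0 genome_len 1000).map (fun start =>
          (start,
            if start + window_size ≤ genome_len then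
              ((positions.countP (fun p => decide (p ≤ start + window_size)) : Int)
                - (positions.countP (fun p => decide (p < start)) : Int))
            else
              ((positions.countP (fun p => decide (p ≤ genome_len)) : Int)
                - (positions.countP (fun p => decide (p < start)) : Int)
                + (positions.countP (fun p => decide (p ≤ start + window_size - genome_len)) : Int)))) := by
  unfold sites_per_window
  rw [PySem.List.foldl_append_singleton_eq_map]
  refine List.map_congr_left (fun s hs => ?_)
  simp only [(bisect_counts positions _).1, (bisect_counts positions _).2]

theorem sites_per_window_spec : Claim_unchanged_sites_per_window := by
  intro positions genome_len window_size _hdom hD'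
  show sites_per_window positions genome_len window_size = _
  rw [sites_per_window_eq_map]
  unfold sites_per_window_alt
  refine List.map_congr_left (fun s hs => ?_)
  have hsr : 0 ≤ s ∧ s < genome_len := by
    have := (PySem.List.mem_pyRange_iff_of_pos (by norm_num : (0:Int) < 1000) s).mp hs
    exact ⟨by omega, by omega⟩
  by_cases hcase : s + window_size ≤ genome_len
  · simp only [hcase, if_pos]
    have hgap : positions.countP (fun p => decide (s + window_size < p ∧ p < s)) = 0 := by
      rw [List.countP_eq_zero]
      intro p hp
      simp only [decide_eq_true_eq, not_and, not_lt]
      intro h1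
      by_contra hlt
      rw [not_le] at hlt
      rcases lt_or_ge window_size 0 with hws | hws
      · exact hD' ⟨hws, s, hs, p, hp, h1, hlt⟩
      · omega
    have := count_sub positions s (s + window_size)
    rw [hgap] at this
    push_cast at this ⊢
    simp only [Prod.mk.injEq]
    exact ⟨trivial, by omega⟩
  · simp only [hcase, if_false]
    have hgap : positions.countP (fun p => decide (genome_len < p ∧ p < s)) = 0 := by
      rw [List.countP_eq_zero]
      intro p hp
      simp only [decide_eq_true_eq, not_and, not_lt]
      omega
    have := count_sub positions s genome_len
    rw [hgap] at this
    push_cast at this ⊢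
    simp only [Prod.mk.injEq]
    exact ⟨trivial, by omega⟩

theorem sites_per_window_changed : Claim_changed_sites_per_window := by
  unfold Claim_changed_sites_per_window; decide

theorem sites_per_window_tight : Claim_exact_sites_per_window := by
  intro positions genome_len window_size _dom hD heq
  obtain ⟨hws, s, hs, p, hp, hp1, hp2⟩ := hD
  rw [sites_per_window_eq_map] at heq
  unfold sites_per_window_alt at heq
  obtain ⟨i, hi, hieq⟩ := List.mem_iff_getElem.mp hs
  have hrange : (PySem.List.pyRange 0 genome_len 1000)[i]? = some s := by
    rw [List.getElem?_eq_getElem hi, hieq]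
  have hfg := congrArg (fun l => l[i]?) heq
  simp only [List.getElem?_map, hrange, Option.map_some] at hfg
  have hsG : s < genome_len :=
    ((PySem.List.mem_pyRange_iff_of_pos (by norm_num : (0:Int) < 1000) s).mp hs).2.1
  have hcase : s + window_size ≤ genome_len := by omega
  simp only [hcase, if_pos, Option.some.injEq, Prod.mk.injEq] at hfg
  obtain ⟨-, hcount⟩ := hfg
  have hz : positions.countP (fun q => decide (s ≤ q ∧ q ≤ s + window_size)) = 0 := by
    rw [List.countP_eq_zero]
    intro a _
    simp only [decide_eq_true_eq, not_and, not_le]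
    omega
  have hpos : 0 < positions.countP (fun q => decide (s + window_size < q ∧ q < s)) :=
    List.countP_pos_iff.mpr ⟨p, hp, by simp [hp1, hp2]⟩
  have hcs := count_sub positions s (s + window_size)
  push_cast at hcs hcount
  omega
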